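-- pv_equiv track=rewrite | github.com/BojanUSI/Python-Algorithms | Exam Exercises/192.py | good_are_adjacent
-- ===== SOURCE A (Python) =====
-- def is_good(x):
--     if x % 2 == 0:
--         return True
--     else:
--         return False
--
-- def good_are_adjacent(A):
--     c = 0
--     for i in range(len(A)-1):
--         if (is_good(A[i]) and is_good(A[i+1])) or \
--         (not is_good(A[i]) and not is_good(A[i+1])):
--             i += 1
--         else:
--             c += 1
--
--     if c <= 1:
--         return True
--     else:
--         return False
-- ===== SOURCE B (Python) =====
-- def good_are_adjacent(A):
--     # map to parities, then materialise one representative per maximal run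
--     p = [x % 2 for x in A]
--     runs = []
--     for v in p:
--         if not runs or runs[-1] != v:
--             runs.append(v)
--     return len(runs) <= 2
-- ===== Notes on version B (the rewrite author's own statement) =====
-- stated objective: simpler
-- what changed: Replaces the index-based adjacent-pair comparison loop counting parity transitions with a map-to-parities then run-grouping decomposition: build the list of maximal same-parity run representatives and test that there are at most two runs.
import Mathlib
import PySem

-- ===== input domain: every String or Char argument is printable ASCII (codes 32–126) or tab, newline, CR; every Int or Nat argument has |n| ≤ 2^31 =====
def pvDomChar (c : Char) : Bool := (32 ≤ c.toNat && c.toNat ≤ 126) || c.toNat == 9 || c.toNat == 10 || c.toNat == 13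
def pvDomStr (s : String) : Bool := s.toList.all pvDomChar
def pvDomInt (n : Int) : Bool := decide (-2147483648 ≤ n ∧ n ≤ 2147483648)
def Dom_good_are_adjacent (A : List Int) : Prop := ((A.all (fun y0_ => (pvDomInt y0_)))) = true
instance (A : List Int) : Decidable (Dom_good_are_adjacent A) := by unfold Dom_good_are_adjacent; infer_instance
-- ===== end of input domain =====

-- B replaces A's index-based adjacent-pair transition count with a map-to-parities
-- then run-grouping decomposition (at most two maximal parity runs); same values, same cost.

-- ===== PORT A =====
def is_good (x : Int) : Bool := if PySem.Int.mod x 2 = 0 then true else false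

-- indices produced by the range are always in bounds, so the pyGetD default 0 is never used
def good_are_adjacent (A : List Int) : Bool :=
  let c : Int :=
    (PySem.List.pyRange 0 ((A.length : Int) - 1) 1).foldl
      (fun c i =>
        if (is_good (PySem.List.pyGetD A i 0) && is_good (PySem.List.pyGetD A (i + 1) 0))
            || (!is_good (PySem.List.pyGetD A i 0) && !is_good (PySem.List.pyGetD A (i + 1) 0))
        then c
        else c + 1) 0
  if c ≤ 1 then true else false

-- ===== PORT B =====
def good_are_adjacent_alt (A : List Int) : Bool :=
  let p := A.map (fun x => PySem.Int.mod x 2)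
  let runs := p.foldl (fun runs v => if runs = [] || runs.getLast? ≠ some v then runs ++ [v] else runs) []
  decide (runs.length ≤ 2)

-- ===== PRECONDITION & SPEC =====
def Spec_good_are_adjacent (A : List Int) (out : Bool) : Prop := out = good_are_adjacent_alt A
instance (A : List Int) (out : Bool) : Decidable (Spec_good_are_adjacent A out) := by unfold Spec_good_are_adjacent; infer_instance

-- ===== CLAIM (what is proved, stated in full; the proofs are below) =====
def Claim_equal_good_are_adjacent : Prop := ∀ (A : List Int), Dom_good_are_adjacent A → Spec_good_are_adjacent A (good_are_adjacent A)

-- ===== LEMMAS AND PROOFS =====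

-- number of adjacent transitions in a list
def pvTc : List Int → Nat
  | [] => 0
  | [_] => 0
  | a :: b :: t => (if a = b then 0 else 1) + pvTc (b :: t)

lemma pvTc_short (l : List Int) (h : l.length ≤ 1) : pvTc l = 0 := by
  match l, h with
  | [], _ => rfl
  | [_], _ => rfl

lemma pvMod2 (x : Int) : PySem.Int.mod x 2 = 0 ∨ PySem.Int.mod x 2 = 1 := by
  rw [PySem.Int.mod_eq_emod_of_pos (by norm_num : (0:Int) < 2)]
  omega

lemma pvCond (a b : Int) :
    ((is_good a && is_good b) || (!is_good a && !is_good b))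
      = decide (PySem.Int.mod a 2 = PySem.Int.mod b 2) := by
  simp only [is_good]
  rcases pvMod2 a with ha | ha <;> rcases pvMod2 b with hb | hb <;> rw [ha, hb] <;> decide

lemma pvLoopA (A : List Int) (m : Nat) : ∀ (k : Nat) (c : Int), A.length ≤ k + m →
    (PySem.List.pyRange (k : Int) ((A.length : Int) - 1) 1).foldl
      (fun c i =>
        if (is_good (PySem.List.pyGetD A i 0) && is_good (PySem.List.pyGetD A (i + 1) 0))
            || (!is_good (PySem.List.pyGetD A i 0) && !is_good (PySem.List.pyGetD A (i + 1) 0))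
        then c
        else c + 1) c
      = c + (pvTc ((A.drop k).map (fun x => PySem.Int.mod x 2)) : Int) := by
  induction m with
  | zero =>
    intro k c h
    rw [PySem.List.pyRange_one_eq_nil (by omega)]
    rw [List.drop_of_length_le (by omega)]
    simp [pvTc]
  | succ m ih =>
    intro k c h
    by_cases hk : (k : Int) < (A.length : Int) - 1
    · have hk1 : k + 1 < A.length := by omega
      rw [PySem.List.pyRange_one_cons hk]
      rw [List.foldl_cons]
      have e1 : ((k : Int) + 1) = ((k + 1 : Nat) : Int) := by push_cast; ring
      rw [e1, PySem.List.pyGetD_natCast, PySem.List.pyGetD_natCast]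
      have := ih (k + 1) (if (is_good (A.getD k 0) && is_good (A.getD (k+1) 0))
            || (!is_good (A.getD k 0) && !is_good (A.getD (k+1) 0)) then c else c + 1)
        (by omega)
      push_cast at this ⊢
      rw [this]
      have hdk : A.drop k = A[k] :: A.drop (k + 1) :=
        List.drop_eq_getElem_cons (by omega)
      have hdk1 : A.drop (k + 1) = A[k+1] :: A.drop (k + 2) :=
        List.drop_eq_getElem_cons (by omega)
      rw [hdk, hdk1, List.map_cons, List.map_cons]
      rw [List.getD_eq_getElem A 0 (by omega), List.getD_eq_getElem A 0 (by omega)]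
      rw [pvCond]
      show _ = c + ((if PySem.Int.mod A[k] 2 = PySem.Int.mod A[k+1] 2 then 0 else 1) + _ : Nat)
      simp
      split_ifs with hq <;> ring
    · rw [PySem.List.pyRange_one_eq_nil (by omega)]
      rw [pvTc_short _ (by simp; omega)]
      simp

lemma pvLoopB (p : List Int) : ∀ (r : List Int) (v : Int), r.getLast? = some v →
    (p.foldl (fun runs v => if runs = [] || runs.getLast? ≠ some v then runs ++ [v] else runs) r).length
      = r.length + pvTc (v :: p) := by
  induction p with
  | nil => intro r v _; simp [pvTc]
  | cons a t ih =>
    intro r v hv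
    have hr : r ≠ [] := by intro h; simp [h] at hv
    by_cases hav : a = v
    · subst hav
      rw [List.foldl_cons, if_neg (by simp [hr, hv])]
      rw [ih r a hv]
      simp [pvTc]
    · rw [List.foldl_cons, if_pos (by simp [hv, Ne.symm hav])]
      rw [ih (r ++ [a]) a (by simp)]
      simp [pvTc, Ne.symm hav]
      omega

lemma pvAltEq (A : List Int) :
    good_are_adjacent_alt A = decide (pvTc (A.map (fun x => PySem.Int.mod x 2)) ≤ 1) := by
  unfold good_are_adjacent_alt
  cases hp : A.map (fun x => PySem.Int.mod x 2) with
  | nil => simp [pvTc]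
  | cons a t =>
    show decide ((List.foldl
        (fun runs v => if (decide (runs = []) || decide (runs.getLast? ≠ some v)) = true
          then runs ++ [v] else runs) [] (a :: t)).length ≤ 2) = _
    rw [List.foldl_cons]
    have h1 : (if (decide (([]:List Int) = []) || decide (([]:List Int).getLast? ≠ some a)) = true
        then ([]:List Int) ++ [a] else []) = [a] := by simp
    rw [h1, pvLoopB t [a] a (by simp)]
    have h2 : (([a]:List Int).length + pvTc (a :: t) ≤ 2) ↔ (pvTc (a :: t) ≤ 1) := by
      simp; omega
    exact decide_eq_decide.mpr h2

-- ===== VERDICT (by name: the statement is the Claim_ definition above) =====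
theorem good_are_adjacent_spec : Claim_equal_good_are_adjacent := by
  intro A _
  unfold Spec_good_are_adjacent
  rw [pvAltEq]
  unfold good_are_adjacent
  have h0 : ((0 : Nat) : Int) = (0 : Int) := rfl
  have := pvLoopA A A.length 0 0 (by omega)
  rw [h0] at this
  rw [this]
  simp only [List.drop_zero, Int.zero_add]
  by_cases h : pvTc (A.map (fun x => PySem.Int.mod x 2)) ≤ 1
  · rw [if_pos (by exact_mod_cast h), decide_eq_true h]
  · rw [if_neg (by exact_mod_cast h), decide_eq_false h]
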